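-- pv_equiv track=rewrite | github.com/ze-yu-wang/Voronoi-diagram-of-4-lines-program | trimodel.py | is_clean_matching
-- ===== SOURCE A (Python) =====
-- def is_clean_matching(matching):
--     trisector_to_bisectors = {}
--
--     for u, v in matching:
--         tri_node, b_node = (u, v) if u.startswith("Tri") else (v, u)
--
--         if not tri_node.startswith("Tri") or not b_node.startswith("B"):
--             continue  # not a trisector-bisector match
--
--         # Extract info
--         tri_base, _ = tri_node.split("_")
--         b_base = b_node.split("_")[0]
--
--         key = tri_base
--
--         if key not in trisector_to_bisectors:
--             trisector_to_bisectors[key] = set()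
--         trisector_to_bisectors[key].add(b_base)
--
--     for views in trisector_to_bisectors.values():
--         if len(views) == 1:
--             return False
--
--     return True
-- ===== SOURCE B (Python) =====
-- def is_clean_matching(matching):
--     # Pass 1 (same order, same filter and the same ValueError timing as the
--     # original): collect (tri_base, b_base) pairs into a flat list.
--     pairs = []
--     for u, v in matching:
--         tri_node, b_node = (u, v) if u.startswith("Tri") else (v, u)
--         if tri_node.startswith("Tri") and b_node.startswith("B"):
--             tri_base, _ = tri_node.split("_")
--             pairs.append((tri_base, b_node.split("_")[0]))
--     # Pass 2: first occurrences of each trisector base.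
--     keys = []
--     for k, _ in pairs:
--         if k not in keys:
--             keys.append(k)
--     # Pass 3: a trisector seen with exactly one distinct bisector base is dirty.
--     for k in keys:
--         if len({b for kk, b in pairs if kk == k}) == 1:
--             return False
--     return True
-- ===== Notes on version B (the rewrite author's own statement) =====
-- stated objective: alternative
-- what changed: Replaces the incrementally built dict-of-sets with a flat collect-pairs pass followed by an ordered first-occurrence key list and a per-key distinct-bisector scan, so no dictionary (hash grouping) is used at all.
import Mathlib
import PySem

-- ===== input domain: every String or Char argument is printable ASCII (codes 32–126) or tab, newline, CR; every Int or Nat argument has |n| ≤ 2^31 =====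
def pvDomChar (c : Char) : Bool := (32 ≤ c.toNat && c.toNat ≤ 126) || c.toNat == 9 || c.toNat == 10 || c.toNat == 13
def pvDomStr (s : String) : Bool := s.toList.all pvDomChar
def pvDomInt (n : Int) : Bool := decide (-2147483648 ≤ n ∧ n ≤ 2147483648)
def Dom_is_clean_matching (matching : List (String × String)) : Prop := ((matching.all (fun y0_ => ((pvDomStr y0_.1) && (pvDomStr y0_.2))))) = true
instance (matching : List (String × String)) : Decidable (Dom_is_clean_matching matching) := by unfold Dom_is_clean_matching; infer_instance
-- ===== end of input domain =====

-- B replaces A's dict-of-sets grouping by a flat pair list, an ordered first-occurrence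
-- key list and a per-key distinct-bisector scan (alternative decomposition, no hash map).


-- ===== PORT A =====
-- A: one pass building a dict trisector_base -> set of bisector bases, then scan values.
-- 'tri_base, _ = tri_node.split("_")' raises ValueError unless the split has exactly
-- 2 pieces (excluded by Pre_); under Pre_ taking the head of the split is exact.
def is_clean_matching (matching : List (String × String)) : Bool :=
  let d : PySem.Dict String (PySem.Set String) :=
    matching.foldl (fun d p =>
      let tri_node := if PySem.Str.startswith p.1 "Tri" then p.1 else p.2
      let b_node   := if PySem.Str.startswith p.1 "Tri" then p.2 else p.1
      if !(PySem.Str.startswith tri_node "Tri") || !(PySem.Str.startswith b_node "B") then d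
      else
        let tri_base := ((PySem.Str.split? tri_node "_").getD []).headD ""
        let b_base   := ((PySem.Str.split? b_node "_").getD []).headD ""
        d.modify tri_base PySem.Set.empty (fun s => PySem.Set.add s b_base))
      PySem.Dict.empty
  d.values.all (fun views => !(PySem.Set.len views == 1))

-- ===== PORT B =====
def is_clean_matching_alt (matching : List (String × String)) : Bool :=
  let pairs : List (String × String) :=
    matching.foldl (fun acc p =>
      let tri_node := if PySem.Str.startswith p.1 "Tri" then p.1 else p.2
      let b_node   := if PySem.Str.startswith p.1 "Tri" then p.2 else p.1
      if PySem.Str.startswith tri_node "Tri" && PySem.Str.startswith b_node "B" then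
        acc ++ [(((PySem.Str.split? tri_node "_").getD []).headD "",
                 ((PySem.Str.split? b_node "_").getD []).headD "")]
      else acc) []
  let keys : List String :=
    pairs.foldl (fun ks kb => if ks.contains kb.1 then ks else ks ++ [kb.1]) []
  keys.all (fun k =>
    !(PySem.Set.len (PySem.Set.ofList ((pairs.filter (fun kb => kb.1 == k)).map (·.2))) == 1))

-- ===== PRECONDITION & SPEC =====
-- Pre_ excludes exactly the inputs where Python A raises ValueError: a matched
-- trisector node whose split on "_" does not have exactly two pieces.
def Pre_is_clean_matching (matching : List (String × String)) : Prop :=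
  ∀ p ∈ matching,
    (PySem.Str.startswith (if PySem.Str.startswith p.1 "Tri" then p.1 else p.2) "Tri" = true ∧
     PySem.Str.startswith (if PySem.Str.startswith p.1 "Tri" then p.2 else p.1) "B" = true) →
    ((PySem.Str.split? (if PySem.Str.startswith p.1 "Tri" then p.1 else p.2) "_").getD []).length = 2
instance (matching : List (String × String)) : Decidable (Pre_is_clean_matching matching) := by
  unfold Pre_is_clean_matching; infer_instance

def pvWitness_is_clean_matching : (List (String × String)) :=
  [("Tri1_a", "B1_x"), ("B2_y", "Tri1_b"), ("Tri2_c", "B3_z"), ("X", "B1_q")]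

def Spec_is_clean_matching (matching : List (String × String)) (out : Bool) : Prop := out = is_clean_matching_alt matching
instance (matching : List (String × String)) (out : Bool) : Decidable (Spec_is_clean_matching matching out) := by unfold Spec_is_clean_matching; infer_instance

-- ===== CLAIM (what is proved, stated in full; the proofs are below) =====
def Claim_equal_is_clean_matching : Prop := ∀ (matching : List (String × String)), Dom_is_clean_matching matching → Pre_is_clean_matching matching → Spec_is_clean_matching matching (is_clean_matching matching)

-- ===== LEMMAS AND PROOFS =====

-- the common per-edge data: the (tri_node, b_node) orientation, the filter, the extracted pair
def pvMk (p : String × String) : String × String :=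
  ((((PySem.Str.split? (if PySem.Str.startswith p.1 "Tri" then p.1 else p.2) "_").getD []).headD ""),
   (((PySem.Str.split? (if PySem.Str.startswith p.1 "Tri" then p.2 else p.1) "_").getD []).headD ""))

def pvCond (p : String × String) : Bool :=
  PySem.Str.startswith (if PySem.Str.startswith p.1 "Tri" then p.1 else p.2) "Tri" &&
  PySem.Str.startswith (if PySem.Str.startswith p.1 "Tri" then p.2 else p.1) "B"

-- the grouping step of A's fold, on extracted pairs
def pvStep (d : PySem.Dict String (PySem.Set String)) (kb : String × String) :
    PySem.Dict String (PySem.Set String) :=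
  d.modify kb.1 PySem.Set.empty (fun s => PySem.Set.add s kb.2)

-- boolean shape of A's 'continue' test
theorem pvIf {α : Type} (a b : Bool) (d e : α) :
    (if (!a || !b) = true then d else e) = if (a && b) = true then e else d := by
  cases a <;> cases b <;> rfl

-- A's fold body, in if-then-else normal form
theorem pvA_fold' (l : List (String × String)) (d : PySem.Dict String (PySem.Set String)) :
    l.foldl (fun d p => if pvCond p then pvStep d (pvMk p) else d) d
      = ((l.filter pvCond).map pvMk).foldl pvStep d := by
  induction l generalizing d with
  | nil => rfl
  | cons p l ih =>
    rw [List.foldl_cons, List.filter_cons]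
    by_cases h : pvCond p = true
    · simp only [h, if_true, List.map_cons, List.foldl_cons, ih]
    · simp only [h, Bool.false_eq_true, if_false, ih]

-- A's fold over matching = the grouping fold over the extracted pair list
theorem pvA_fold (l : List (String × String)) (d : PySem.Dict String (PySem.Set String)) :
    l.foldl (fun d p =>
      let tri_node := if PySem.Str.startswith p.1 "Tri" then p.1 else p.2
      let b_node   := if PySem.Str.startswith p.1 "Tri" then p.2 else p.1
      if !(PySem.Str.startswith tri_node "Tri") || !(PySem.Str.startswith b_node "B") then d
      else
        let tri_base := ((PySem.Str.split? tri_node "_").getD []).headD ""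
        let b_base   := ((PySem.Str.split? b_node "_").getD []).headD ""
        d.modify tri_base PySem.Set.empty (fun s => PySem.Set.add s b_base)) d
      = ((l.filter pvCond).map pvMk).foldl pvStep d := by
  have hfun : (fun (d : PySem.Dict String (PySem.Set String)) (p : String × String) =>
      let tri_node := if PySem.Str.startswith p.1 "Tri" then p.1 else p.2
      let b_node   := if PySem.Str.startswith p.1 "Tri" then p.2 else p.1
      if !(PySem.Str.startswith tri_node "Tri") || !(PySem.Str.startswith b_node "B") then d
      else
        let tri_base := ((PySem.Str.split? tri_node "_").getD []).headD ""
        let b_base   := ((PySem.Str.split? b_node "_").getD []).headD ""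
        d.modify tri_base PySem.Set.empty (fun s => PySem.Set.add s b_base))
      = (fun d p => if pvCond p then pvStep d (pvMk p) else d) := by
    funext d p
    simp only [pvIf]
    rfl
  rw [hfun, pvA_fold']

-- B's first fold over matching = the same extracted pair list
theorem pvB_pairs (l : List (String × String)) (acc : List (String × String)) :
    l.foldl (fun acc p =>
      let tri_node := if PySem.Str.startswith p.1 "Tri" then p.1 else p.2
      let b_node   := if PySem.Str.startswith p.1 "Tri" then p.2 else p.1
      if PySem.Str.startswith tri_node "Tri" && PySem.Str.startswith b_node "B" then
        acc ++ [(((PySem.Str.split? tri_node "_").getD []).headD "",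
                 ((PySem.Str.split? b_node "_").getD []).headD "")]
      else acc) acc
      = acc ++ (l.filter pvCond).map pvMk := by
  have := PySem.List.foldl_append_if pvCond pvMk l acc
  rw [← this]
  rfl

-- grouping invariant: getD after the grouping fold
theorem pvStep_getD (P : List (String × String)) (d : PySem.Dict String (PySem.Set String))
    (k : String) :
    (P.foldl pvStep d).getD k PySem.Set.empty
      = PySem.Set.update (d.getD k PySem.Set.empty) ((P.filter (fun kb => kb.1 == k)).map (·.2)) := by
  induction P generalizing d with
  | nil => rfl
  | cons kb P ih =>
    simp only [List.foldl_cons, ih, pvStep]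
    by_cases h : kb.1 = k
    · subst h
      rw [PySem.Dict.getD_modify_self, List.filter_cons_of_pos (by simp), List.map_cons]
      rfl
    · rw [PySem.Dict.getD_modify_of_ne d PySem.Set.empty _ (fun hh => h hh.symm),
          List.filter_cons_of_neg (by simp [h])]

-- keys of the grouping fold = first occurrences of the tri bases
theorem pvStep_keys (P : List (String × String)) :
    (P.foldl pvStep PySem.Dict.empty).keys = PySem.Set.ofList (P.map (·.1)) := by
  have h1 : P.foldl pvStep PySem.Dict.empty
      = P.foldl (fun d x => d.modify x.1 PySem.Set.empty
          ((fun (_ : PySem.Dict String (PySem.Set String)) (kb : String × String)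
              (s : PySem.Set String) => PySem.Set.add s kb.2) d x)) PySem.Dict.empty := rfl
  rw [h1, PySem.Dict.keys_foldl_modify_key]
  simp [PySem.Set.update, PySem.Set.ofList_eq_foldl]

theorem pvStep_nodup (P : List (String × String)) :
    (P.foldl pvStep PySem.Dict.empty).keys.Nodup := by
  exact PySem.Dict.nodup_keys_foldl_modify_key P (fun kb : String × String => kb.1)
      PySem.Set.empty (fun _ kb s => PySem.Set.add s kb.2) PySem.Dict.empty
      (by simp)

-- B's key fold = ordered distinct tri bases
theorem pvB_keys (P : List (String × String)) :
    P.foldl (fun ks kb => if ks.contains kb.1 then ks else ks ++ [kb.1]) []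
      = PySem.Set.ofList (P.map (·.1)) := by
  rw [PySem.Set.ofList_eq_foldl, List.foldl_map]
  rfl

-- ===== VERDICT (by name: the statement is the Claim_ definition above) =====
theorem is_clean_matching_spec : Claim_equal_is_clean_matching := by
  intro matching _ _
  unfold Spec_is_clean_matching is_clean_matching is_clean_matching_alt
  rw [pvA_fold, pvB_pairs]
  simp only [List.nil_append]
  rw [pvB_keys, PySem.Dict.values_eq_map_keys _ (pvStep_nodup _) PySem.Set.empty,
      pvStep_keys, List.all_map]
  congr 1
  funext k
  simp only [Function.comp_apply]
  rw [pvStep_getD]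
  rfl
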